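-- PySemCore.lean, part 1 of 8 (source lines 32-440 of 3059): Raise and Int: the side conditions under which Python's raising operations return; floor division and modulo with Python's sign rules, int()/str(), bit_length/bit_count, & | ^ on ints, int(s, base).
-- An excerpt: the file's own header and imports are repeated below, and the other parts are separate documents.
import Lean.Meta.Tactic.Simp.RegisterCommand
/-
PySem — Python-exact primitives for the program-equivalence environment (pv_equiv).

A Lean port of a Python function should compute what the Python computes on every
admitted input. Ports diverge from their Python almost always at a dozen built-ins
(negative indexing, slicing, // and % with a negative divisor, dict overwrite order,
int() parsing, stable sort, min/max ties, the whitespace/digit/case sets of str), not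
in the algorithm. This module implements exactly those built-ins with CPython's
semantics (reference: CPython 3.13), so a port can call them instead of re-inventing
them. Where Python RAISES, the primitive returns `Option` (none = the exception) and a
decidable side condition in `PySem.Raise` names the inputs on which it does not, for
the port's `Pre_`.

Core Lean plus one Lean-frontend module for the `pysem` simp-set registration (no Mathlib import): it compiles in about a minute wherever the grader runs.
Every definition is computable; the `@[simp]` lemmas and the bridge lemmas reduce the
primitives to the usual List/Int/String functions under the side condition that makes
them agree, so proofs about honest ports stay in familiar territory. String functions
are exact on the environment's stated input domain (printable ASCII); outside it the
Unicode tables are not modelled in this version.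

GRADER CODE: kernel-checked, differentially tested against CPython (tests/), trusted.
-/

/-- The `pysem` simp set: every PySem lemma (tagged at the end of PySem.lean — an attribute cannot be used in the module that
registers it), so `simp only [pysem]` / `simp [pysem, …]` tries the whole prelude book without the author knowing each name.
(This import is the one non-core dependency of this file; it costs ≈50 s of compile per container — a third tiny module would
avoid it and is the planned refinement.) -/
register_simp_attr pysem

namespace PySem

/-! ## Raise — the side conditions under which Python's raising operations return -/
namespace Raise

/-- `xs[i]` does not raise IndexError: `-len ≤ i < len`. -/
def InRange (n : Nat) (i : Int) : Prop := -(n : Int) ≤ i ∧ i < n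
instance (n : Nat) (i : Int) : Decidable (InRange n i) := by unfold InRange; exact inferInstance

end Raise

/-! ## Int — floor division and modulo with Python's sign rules, int()/str() -/
namespace Int

/-- Python `a // b` (floor toward −∞). `b = 0` raises ZeroDivisionError in Python; here it is `none`. -/
def floordiv? (a b : _root_.Int) : Option _root_.Int := if b = 0 then none else some (a.fdiv b)
/-- Python `a // b` for a divisor known to be non-zero (state `b ≠ 0` in Pre_). -/
def floordiv (a b : _root_.Int) : _root_.Int := a.fdiv b
/-- Python `a % b` (result has the sign of the DIVISOR). -/
def mod? (a b : _root_.Int) : Option _root_.Int := if b = 0 then none else some (a.fmod b)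
def mod (a b : _root_.Int) : _root_.Int := a.fmod b
/-- Python `divmod(a, b)`. -/
def divmod? (a b : _root_.Int) : Option (_root_.Int × _root_.Int) :=
  if b = 0 then none else some (a.fdiv b, a.fmod b)
/-- Python `int(a / b)` for integers small enough that the float division is exact (|a|,|b| < 2^53): truncation toward zero. -/
def truncdiv (a b : _root_.Int) : _root_.Int := a.tdiv b

@[simp] theorem floordiv_eq_ediv_of_pos {a b : _root_.Int} (h : 0 < b) : floordiv a b = a / b := by
  unfold floordiv; exact Int.fdiv_eq_ediv_of_nonneg _ (Int.le_of_lt h)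
@[simp] theorem mod_eq_emod_of_pos {a b : _root_.Int} (h : 0 < b) : mod a b = a % b := by
  unfold mod; exact Int.fmod_eq_emod_of_nonneg _ (Int.le_of_lt h)
theorem floordiv?_of_ne_zero {a b : _root_.Int} (h : b ≠ 0) : floordiv? a b = some (floordiv a b) := by
  simp [floordiv?, floordiv, h]
theorem mod?_of_ne_zero {a b : _root_.Int} (h : b ≠ 0) : mod? a b = some (mod a b) := by
  simp [mod?, mod, h]

-- ---- lemma pack 3: // and % at naturals, bounds of %
/-- m // k on naturals is Nat division (also at k = 0: both sides are 0). -/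
@[simp] theorem floordiv_natCast (m k : Nat) : floordiv (m : _root_.Int) (k : _root_.Int) = ((m / k : Nat) : _root_.Int) := by
  unfold floordiv; rw [Int.fdiv_eq_ediv_of_nonneg _ (by omega)]; simp
/-- m % k on naturals is Nat modulo. -/
@[simp] theorem mod_natCast (m k : Nat) : mod (m : _root_.Int) (k : _root_.Int) = ((m % k : Nat) : _root_.Int) := by
  unfold mod; rw [Int.fmod_eq_emod_of_nonneg _ (by omega)]; simp
theorem mod_nonneg (a : _root_.Int) {b : _root_.Int} (h : 0 < b) : 0 ≤ mod a b := by
  rw [mod_eq_emod_of_pos h]; exact Int.emod_nonneg _ (by omega)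
theorem mod_lt (a : _root_.Int) {b : _root_.Int} (h : 0 < b) : mod a b < b := by
  rw [mod_eq_emod_of_pos h]; exact Int.emod_lt_of_pos _ h
/-- a == (a // b) * b + a % b — Python's invariant, for EVERY b (also negative; at b = 0 both sides are a here). -/
theorem floordiv_mul_add_mod (a b : _root_.Int) : floordiv a b * b + mod a b = a := by
  unfold floordiv mod; rw [Int.add_comm]; exact Int.fmod_add_fdiv_mul a b
/-- a % b for a NEGATIVE divisor lies in (b, 0] — the sign-of-the-divisor rule. -/
theorem mod_neg_bounds (a : _root_.Int) {b : _root_.Int} (h : b < 0) : b < mod a b ∧ mod a b ≤ 0 := by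
  unfold mod; rw [Int.fmod_eq_emod]
  have hne : b ≠ 0 := by omega
  have h0 := Int.emod_nonneg a hne
  have h1 := Int.emod_lt a hne
  have hb : (b.natAbs : _root_.Int) = -b := Int.ofNat_natAbs_of_nonpos (by omega)
  rw [hb] at h1
  split
  · rename_i hd
    have hd' : b ∣ a := hd.resolve_left (by omega)
    rw [Int.emod_eq_zero_of_dvd hd']; omega
  · rename_i hd
    have : a % b ≠ 0 := fun he => hd (Or.inr (Int.dvd_of_emod_eq_zero he))
    omega
/-- the midpoint of lo ≤ hi lies between them (binary search). -/
theorem floordiv_two_mid_bounds {lo hi : _root_.Int} (h : lo ≤ hi) : lo ≤ floordiv (lo + hi) 2 ∧ floordiv (lo + hi) 2 ≤ hi := by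
  rw [floordiv_eq_ediv_of_pos (by omega)]; omega

/-! ### Lemma pack 4 — % as divisibility, the // bracket (floor and ceiling) -/
/-- 'a % b == 0' is divisibility — for EVERY b (at b = 0 both sides say a = 0). -/
theorem mod_eq_zero_iff_dvd (a b : _root_.Int) : mod a b = 0 ↔ b ∣ a := by
  unfold mod; rw [Int.fmod_eq_emod]
  split
  · simp [Int.dvd_iff_emod_eq_zero]
  · rename_i h
    have hb : b < 0 := by omega
    have hnd : ¬ b ∣ a := fun hd => h (Or.inr hd)
    have h0 := Int.emod_nonneg a (show b ≠ 0 by omega)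
    have h1 := Int.emod_lt a (show b ≠ 0 by omega)
    have hb' : (b.natAbs : _root_.Int) = -b := Int.ofNat_natAbs_of_nonpos (by omega)
    rw [hb'] at h1
    have : a % b ≠ 0 := fun he => hnd (Int.dvd_of_emod_eq_zero he)
    constructor
    · intro he; omega
    · intro hd; exact absurd hd hnd
/-- the same once 'simp' has already turned mod into core's % (it does whenever 0 < b is at hand): a % b = 0 is divisibility too. -/
theorem emod_eq_zero_iff_dvd (a b : _root_.Int) : a % b = 0 ↔ b ∣ a := ⟨Int.dvd_of_emod_eq_zero, Int.emod_eq_zero_of_dvd⟩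
theorem mod?_eq_some_zero_iff_dvd {a b : _root_.Int} (hb : b ≠ 0) : mod? a b = some 0 ↔ b ∣ a := by
  rw [mod?_of_ne_zero hb, Option.some.injEq, mod_eq_zero_iff_dvd]
/-- characterising a // b for b > 0 by the bracket q*b ≤ a < (q+1)*b (and its two halves). -/
theorem le_floordiv_iff_mul_le {a b q : _root_.Int} (hb : 0 < b) : q ≤ floordiv a b ↔ q * b ≤ a := by
  rw [floordiv_eq_ediv_of_pos hb]; exact Int.le_ediv_iff_mul_le hb
theorem floordiv_lt_iff_lt_mul {a b q : _root_.Int} (hb : 0 < b) : floordiv a b < q ↔ a < q * b := by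
  rw [floordiv_eq_ediv_of_pos hb]; exact Int.ediv_lt_iff_lt_mul hb
theorem floordiv_eq_iff_of_pos {a b q : _root_.Int} (hb : 0 < b) : floordiv a b = q ↔ q * b ≤ a ∧ a < (q + 1) * b := by
  rw [← le_floordiv_iff_mul_le hb, ← floordiv_lt_iff_lt_mul hb]; omega
/-- ceiling division spelled -((-a) // b): the bracket (q-1)*b < a ≤ q*b. -/
theorem neg_floordiv_neg_eq_iff_of_pos {a b q : _root_.Int} (hb : 0 < b) : -(floordiv (-a) b) = q ↔ (q - 1) * b < a ∧ a ≤ q * b := by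
  have h := @floordiv_eq_iff_of_pos (-a) b (-q) hb
  rw [Int.neg_mul, show (-q + 1) * b = -((q - 1) * b) by rw [← Int.neg_mul]; congr 1; omega] at h
  omega
/-! ### Lemma pack 6 — sign reflection of // and %, // on non-negatives, parity, pow with a modulus -/
/-- (-a) // (-b) == a // b (for every b; at b = 0 both sides are 0). -/
@[simp] theorem floordiv_neg_neg (a b : _root_.Int) : floordiv (-a) (-b) = floordiv a b := by
  unfold floordiv; exact Int.neg_fdiv_neg a b
/-- (-a) % (-b) == -(a % b) (the sign-of-the-divisor rule, reflected). -/
@[simp] theorem mod_neg_neg (a b : _root_.Int) : mod (-a) (-b) = -(mod a b) := by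
  unfold mod; exact Int.neg_fmod_neg a b
/-- a // b ≥ 0 when a, b ≥ 0. -/
theorem floordiv_nonneg {a b : _root_.Int} (ha : 0 ≤ a) (hb : 0 ≤ b) : 0 ≤ floordiv a b := by
  unfold floordiv; exact Int.fdiv_nonneg ha hb
/-- a // b for 0 ≤ b (any a) is core's a / b (floor = Euclidean for a non-negative divisor; also at b = 0). Cite by name: not in the simp set. -/
theorem floordiv_of_nonneg {a b : _root_.Int} (hb : 0 ≤ b) : floordiv a b = a / b := by
  unfold floordiv; exact Int.fdiv_eq_ediv_of_nonneg _ hb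
/-- a % b for 0 ≤ b is core's a % b. -/
theorem mod_of_nonneg (a : _root_.Int) {b : _root_.Int} (hb : 0 ≤ b) : mod a b = a % b := by
  unfold mod; exact Int.fmod_eq_emod_of_nonneg _ hb
/-- a % 2 is 0 or 1. -/
theorem mod_two_eq (a : _root_.Int) : mod a 2 = 0 ∨ mod a 2 = 1 := by
  unfold mod; exact Int.fmod_two_eq a
/-- a // b * b == a exactly when b divides a (b ≠ 0 not needed: at b = 0 both say a = 0). -/
theorem floordiv_mul_eq_self_iff_dvd (a b : _root_.Int) : floordiv a b * b = a ↔ b ∣ a := by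
  have h := floordiv_mul_add_mod a b
  rw [← mod_eq_zero_iff_dvd]; omega

/-- Python pow(b, e, m) for e ≥ 0 and m ≠ 0: (b ** e) % m, sign of m (state 'm ≠ 0 ∧ 0 ≤ e' in Pre_; a negative e is the modular
inverse, not modelled). -/
def powMod (b : _root_.Int) (e : Nat) (m : _root_.Int) : _root_.Int := mod (b ^ e) m
theorem powMod_eq (b : _root_.Int) (e : Nat) (m : _root_.Int) : powMod b e m = mod (b ^ e) m := rfl
theorem powMod_eq_emod (b : _root_.Int) (e : Nat) {m : _root_.Int} (hm : 0 < m) : powMod b e m = b ^ e % m := by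
  rw [powMod, mod_eq_emod_of_pos hm]
theorem powMod_nonneg (b : _root_.Int) (e : Nat) {m : _root_.Int} (hm : 0 < m) : 0 ≤ powMod b e m := mod_nonneg _ hm
theorem powMod_lt (b : _root_.Int) (e : Nat) {m : _root_.Int} (hm : 0 < m) : powMod b e m < m := mod_lt _ hm

/-! ### Pack 5 — int.bit_length() / int.bit_count() (Python-exact on negatives: both look at |n|). Structural on a fuel argument, so
'decide' / 'rfl' evaluate them and the halving lemmas below are plain inductions. Lean core's bitwise operators on Int — n <<< k, n >>> k,
and ~~~n / Int.not — already have Python's infinite-two's-complement semantics; use them directly. -/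
def bitLengthAux : Nat → Nat → Nat
  | 0, _ => 0
  | f + 1, n => if n = 0 then 0 else bitLengthAux f (n / 2) + 1
def bitCountAux : Nat → Nat → Nat
  | 0, _ => 0
  | f + 1, n => if n = 0 then 0 else n % 2 + bitCountAux f (n / 2)
/-- Python 'n.bit_length()': binary digits of |n| (0 for 0). -/
def bitLength (n : _root_.Int) : Nat := bitLengthAux (n.natAbs + 1) n.natAbs
/-- Python 'n.bit_count()': ones in the binary expansion of |n|. -/
def bitCount (n : _root_.Int) : Nat := bitCountAux (n.natAbs + 1) n.natAbs

private theorem bitLengthAux_stable : ∀ (f g n : Nat), n < f → n < g → bitLengthAux f n = bitLengthAux g n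
  | 0, _, _, hf, _ => absurd hf (Nat.not_lt_zero _)
  | _, 0, _, _, hg => absurd hg (Nat.not_lt_zero _)
  | f + 1, g + 1, n, hf, hg => by
    simp only [bitLengthAux]
    split
    · rfl
    · rw [bitLengthAux_stable f g (n / 2) (by omega) (by omega)]
private theorem bitCountAux_stable : ∀ (f g n : Nat), n < f → n < g → bitCountAux f n = bitCountAux g n
  | 0, _, _, hf, _ => absurd hf (Nat.not_lt_zero _)
  | _, 0, _, _, hg => absurd hg (Nat.not_lt_zero _)
  | f + 1, g + 1, n, hf, hg => by
    simp only [bitCountAux]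
    split
    · rfl
    · rw [bitCountAux_stable f g (n / 2) (by omega) (by omega)]
@[simp] theorem bitLength_zero : bitLength 0 = 0 := rfl
@[simp] theorem bitCount_zero : bitCount 0 = 0 := rfl
@[simp] theorem bitLength_neg (n : _root_.Int) : bitLength (-n) = bitLength n := by simp [bitLength]
@[simp] theorem bitCount_neg (n : _root_.Int) : bitCount (-n) = bitCount n := by simp [bitCount]
/-- the halving recursion Python code uses ('while n: n >>= 1; c += 1'): for a natural m, bit_length(m) = bit_length(m // 2) + 1 (m > 0). -/
private theorem bitLength_natCast' (m : Nat) : bitLength (m : _root_.Int) = if m = 0 then 0 else bitLength ((m / 2 : Nat) : _root_.Int) + 1 := by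
  simp only [bitLength, Int.natAbs_natCast]
  rw [bitLengthAux]
  split
  · rfl
  · rw [bitLengthAux_stable m (m / 2 + 1) (m / 2) (by omega) (by omega)]
private theorem bitCount_natCast' (m : Nat) : bitCount (m : _root_.Int) = if m = 0 then 0 else m % 2 + bitCount ((m / 2 : Nat) : _root_.Int) := by
  simp only [bitCount, Int.natAbs_natCast]
  rw [bitCountAux]
  split
  · rfl
  · rw [bitCountAux_stable m (m / 2 + 1) (m / 2) (by omega) (by omega)]
@[simp] theorem bitLength_natCast_zero : bitLength ((0 : Nat) : _root_.Int) = 0 := rfl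
@[simp] theorem bitCount_natCast_zero : bitCount ((0 : Nat) : _root_.Int) = 0 := rfl
theorem bitLength_natCast {m : Nat} (h : 0 < m) : bitLength (m : _root_.Int) = bitLength ((m / 2 : Nat) : _root_.Int) + 1 := by
  rw [bitLength_natCast', if_neg (by omega)]
theorem bitCount_natCast {m : Nat} (h : 0 < m) : bitCount (m : _root_.Int) = m % 2 + bitCount ((m / 2 : Nat) : _root_.Int) := by
  rw [bitCount_natCast', if_neg (by omega)]
/-- the same at a non-negative Int with Python's // (floordiv by 2). -/
theorem bitLength_of_pos {n : _root_.Int} (h : 0 < n) : bitLength n = bitLength (floordiv n 2) + 1 := by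
  obtain ⟨m, rfl⟩ := Int.eq_ofNat_of_zero_le (Int.le_of_lt h)
  rw [bitLength_natCast (by omega), floordiv_eq_ediv_of_pos (by decide), show (m : _root_.Int) / 2 = ((m / 2 : Nat) : _root_.Int) by omega]
theorem bitCount_of_pos {n : _root_.Int} (h : 0 < n) : bitCount n = (mod n 2).toNat + bitCount (floordiv n 2) := by
  obtain ⟨m, rfl⟩ := Int.eq_ofNat_of_zero_le (Int.le_of_lt h)
  rw [bitCount_natCast (by omega), floordiv_eq_ediv_of_pos (by decide), mod_eq_emod_of_pos (by decide),
    show (m : _root_.Int) / 2 = ((m / 2 : Nat) : _root_.Int) by omega, show (m : _root_.Int) % 2 = ((m % 2 : Nat) : _root_.Int) by omega, Int.toNat_natCast]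
/-- bit_length brackets |n|: 2^(b-1) ≤ |n| < 2^b (n ≠ 0), and bit_length 0 = 0. -/
theorem lt_two_pow_bitLength (n : _root_.Int) : n.natAbs < 2 ^ bitLength n := by
  suffices H : ∀ (k m : Nat), m < 2 ^ k → m < 2 ^ bitLength (m : _root_.Int) by
    have := H n.natAbs n.natAbs (Nat.lt_two_pow_self)
    simpa [bitLength] using this
  intro k
  induction k with
  | zero => intro m hm; rw [bitLength_natCast']; split <;> simp_all
  | succ k ih =>
    intro m hm
    rw [bitLength_natCast']
    split
    · simp_all
    · have := ih (m / 2) (by omega)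
      rw [Nat.pow_succ]; omega
theorem two_pow_bitLength_le (n : _root_.Int) (h : n ≠ 0) : 2 ^ (bitLength n - 1) ≤ n.natAbs := by
  suffices H : ∀ (k m : Nat), m < 2 ^ k → m ≠ 0 → 2 ^ (bitLength (m : _root_.Int) - 1) ≤ m by
    have := H n.natAbs n.natAbs (Nat.lt_two_pow_self) (by omega)
    simpa [bitLength] using this
  intro k
  induction k with
  | zero => intro m hm h0; omega
  | succ k ih =>
    intro m hm h0
    rw [bitLength_natCast (by omega)]
    by_cases h1 : m / 2 = 0
    · rw [h1]; simp; omega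
    · have := ih (m / 2) (by omega) h1
      have hb : bitLength ((m / 2 : Nat) : _root_.Int) ≠ 0 := by rw [bitLength_natCast (by omega)]; omega
      rw [show bitLength ((m / 2 : Nat) : _root_.Int) + 1 - 1 = (bitLength ((m / 2 : Nat) : _root_.Int) - 1) + 1 by omega, Nat.pow_succ]
      omega
theorem bitCount_le_bitLength (n : _root_.Int) : bitCount n ≤ bitLength n := by
  suffices H : ∀ (k m : Nat), m < 2 ^ k → bitCount (m : _root_.Int) ≤ bitLength (m : _root_.Int) by
    have := H n.natAbs n.natAbs (Nat.lt_two_pow_self); simpa [bitLength, bitCount] using this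
  intro k
  induction k with
  | zero => intro m hm; rw [bitLength_natCast', bitCount_natCast']; split <;> simp_all
  | succ k ih => intro m hm; rw [bitLength_natCast', bitCount_natCast']; split; simp; have := ih (m / 2) (by omega); omega
/-! ### Pack 6 — Python's & | ^ on ints (infinite two's complement), exact on negatives, via core Nat's &&& ||| ^^^ (decide-reducible).
A negative operand a is ~a' with a' = -a-1 ≥ 0; De Morgan then leaves one Nat operation per sign case. -/
/-- Python 'a & b'. -/
def band (a b : _root_.Int) : _root_.Int :=
  if 0 ≤ a then
    if 0 ≤ b then ((a.toNat &&& b.toNat : Nat) : _root_.Int)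
    else ((a.toNat - (a.toNat &&& (-b - 1).toNat) : Nat) : _root_.Int)
  else
    if 0 ≤ b then ((b.toNat - (b.toNat &&& (-a - 1).toNat) : Nat) : _root_.Int)
    else -(((-a - 1).toNat ||| (-b - 1).toNat : Nat) : _root_.Int) - 1
/-- Python 'a | b'. -/
def bor (a b : _root_.Int) : _root_.Int :=
  if 0 ≤ a then
    if 0 ≤ b then ((a.toNat ||| b.toNat : Nat) : _root_.Int)
    else -(((-b - 1).toNat - ((-b - 1).toNat &&& a.toNat) : Nat) : _root_.Int) - 1
  else
    if 0 ≤ b then -(((-a - 1).toNat - ((-a - 1).toNat &&& b.toNat) : Nat) : _root_.Int) - 1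
    else -(((-a - 1).toNat &&& (-b - 1).toNat : Nat) : _root_.Int) - 1
/-- Python 'a ^ b'. -/
def bxor (a b : _root_.Int) : _root_.Int :=
  if 0 ≤ a then
    if 0 ≤ b then ((a.toNat ^^^ b.toNat : Nat) : _root_.Int)
    else -((a.toNat ^^^ (-b - 1).toNat : Nat) : _root_.Int) - 1
  else
    if 0 ≤ b then -(((-a - 1).toNat ^^^ b.toNat : Nat) : _root_.Int) - 1
    else (((-a - 1).toNat ^^^ (-b - 1).toNat : Nat) : _root_.Int)

/-- on naturals these ARE Nat's operators. -/
@[simp] theorem band_natCast (m n : Nat) : band (m : _root_.Int) (n : _root_.Int) = ((m &&& n : Nat) : _root_.Int) := by simp [band]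
@[simp] theorem bor_natCast (m n : Nat) : bor (m : _root_.Int) (n : _root_.Int) = ((m ||| n : Nat) : _root_.Int) := by simp [bor]
@[simp] theorem bxor_natCast (m n : Nat) : bxor (m : _root_.Int) (n : _root_.Int) = ((m ^^^ n : Nat) : _root_.Int) := by simp [bxor]
theorem band_of_nonneg {a b : _root_.Int} (ha : 0 ≤ a) (hb : 0 ≤ b) : band a b = ((a.toNat &&& b.toNat : Nat) : _root_.Int) := by simp [band, ha, hb]
theorem bor_of_nonneg {a b : _root_.Int} (ha : 0 ≤ a) (hb : 0 ≤ b) : bor a b = ((a.toNat ||| b.toNat : Nat) : _root_.Int) := by simp [bor, ha, hb]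
theorem bxor_of_nonneg {a b : _root_.Int} (ha : 0 ≤ a) (hb : 0 ≤ b) : bxor a b = ((a.toNat ^^^ b.toNat : Nat) : _root_.Int) := by simp [bxor, ha, hb]
theorem band_nonneg_of_nonneg_left {a : _root_.Int} (b : _root_.Int) (ha : 0 ≤ a) : 0 ≤ band a b := by
  unfold band; simp only [ha, ↓reduceIte]; split <;> omega
theorem band_comm (a b : _root_.Int) : band a b = band b a := by
  unfold band; split <;> split <;> simp_all [Nat.and_comm, Nat.or_comm] <;> omega
theorem bor_comm (a b : _root_.Int) : bor a b = bor b a := by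
  unfold bor; split <;> split <;> simp_all [Nat.and_comm, Nat.or_comm] <;> omega
theorem bxor_comm (a b : _root_.Int) : bxor a b = bxor b a := by
  unfold bxor; split <;> split <;> simp_all [Nat.xor_comm] <;> omega
@[simp] theorem band_zero (a : _root_.Int) : band a 0 = 0 := by unfold band; split <;> simp
@[simp] theorem bor_zero (a : _root_.Int) : bor a 0 = a := by unfold bor; split <;> simp <;> omega
@[simp] theorem bxor_zero (a : _root_.Int) : bxor a 0 = a := by unfold bxor; split <;> simp <;> omega
@[simp] theorem bxor_self (a : _root_.Int) : bxor a a = 0 := by unfold bxor; split <;> simp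
@[simp] theorem band_self (a : _root_.Int) : band a a = a := by unfold band; split <;> simp [Nat.and_self, Nat.or_self] <;> omega
@[simp] theorem band_neg_one (a : _root_.Int) : band a (-1) = a := by unfold band; split <;> simp <;> omega
/-- a & 1 is a % 2 (Python, every sign). -/
theorem band_one (a : _root_.Int) : band a 1 = mod a 2 := by
  unfold band mod
  have h1 : (0 : _root_.Int) ≤ 1 := by decide
  simp only [h1, ↓reduceIte]
  rw [Int.fmod_eq_emod_of_nonneg _ (by decide)]
  split
  · rename_i ha; rw [show (1 : _root_.Int).toNat = 1 by rfl, Nat.and_one_is_mod]; omega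
  · rename_i ha; rw [show (1 : _root_.Int).toNat = 1 by rfl]
    have : (1 &&& (-a - 1).toNat : Nat) = (-a - 1).toNat % 2 := by rw [Nat.and_comm, Nat.and_one_is_mod]
    rw [this]; omega

/-! Every string-valued primitive below is DEFINED over `List Char` (kernel-transparent: `decide`/`rfl` reduce it and
lemmas unfold it) and the `String` form is a thin wrapper through `String.toList` / `String.ofList` — Lean 4.29's own String
operations (length, append, isEmpty, extract, …) are opaque constants the kernel cannot unfold. -/

/-- The characters Python's `int()` strips around the digits (str.isspace minus U+001C–U+001F), ASCII part. -/
def isIntSpace (c : Char) : Bool :=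
  c = ' ' || c = '\t' || c = '\n' || c = '\r' || c = '\x0b' || c = '\x0c'

private def digitsVal? : List Char → Option Nat
  | [] => none
  | cs =>
    -- digits with single underscores BETWEEN digits ('1_000'); no leading/trailing/double underscore
    let rec go : List Char → Bool → Nat → Option Nat
      | [], afterDigit, acc => if afterDigit then some acc else none
      | c :: rest, afterDigit, acc =>
        if c.isDigit then go rest true (acc * 10 + (c.toNat - '0'.toNat))
        else if c = '_' ∧ afterDigit then
          match rest with
          | d :: _ => if d.isDigit then go rest false acc else none
          | [] => none
        else none
    go cs false 0

/-- Python `int(s)` for base 10 over the characters of s: optional surrounding whitespace, optional sign, ASCII digits with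
single underscores between them. `none` = ValueError. (Unicode digits are outside the stated domain.) -/
def ofChars? (s : _root_.List Char) : Option _root_.Int :=
  let cs := (s.dropWhile isIntSpace).reverse.dropWhile isIntSpace |>.reverse
  match cs with
  | '-' :: ds => (digitsVal? ds).map (fun n => -(n : _root_.Int))
  | '+' :: ds => (digitsVal? ds).map (fun n => (n : _root_.Int))
  | ds => (digitsVal? ds).map (fun n => (n : _root_.Int))

/-- Python `int(s)`. -/
def ofStr? (s : String) : Option _root_.Int := ofChars? s.toList

/-! ### Pack 5 — int(s, base) for base 0 / 2..36 (ASCII). -/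
/-- the value of one ASCII digit/letter in bases up to 36 ('7' ↦ 7, 'a'/'A' ↦ 10, …, 'z'/'Z' ↦ 35). -/
def digitVal? (c : Char) : Option Nat :=
  if c.isDigit then some (c.toNat - 48)
  else if 'a' ≤ c ∧ c ≤ 'z' then some (c.toNat - 87)
  else if 'A' ≤ c ∧ c ≤ 'Z' then some (c.toNat - 55)
  else none
private def digitOk (b : Nat) (c : Char) : Bool := match digitVal? c with | some d => decide (d < b) | none => false
/-- digits in base b with single underscores BETWEEN digits; at least one digit. -/
private def digitsValB? (b : Nat) : _root_.List Char → Option Nat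
  | [] => none
  | cs =>
    let rec go : _root_.List Char → Bool → Nat → Option Nat
      | [], afterDigit, acc => if afterDigit then some acc else none
      | c :: rest, afterDigit, acc =>
        if digitOk b c then go rest true (acc * b + (digitVal? c).getD 0)
        else if c = '_' ∧ afterDigit then
          match rest with
          | d :: _ => if digitOk b d then go rest false acc else none
          | [] => none
        else none
    go cs false 0
/-- Python 'int(s, base)' for base = 0 or 2 ≤ base ≤ 36 over the characters of s: surrounding whitespace, a sign, an optional 0b/0o/0x prefix
when it names the base (base 0 takes the base FROM the prefix, else 10 — and then refuses leading zeros: int('010', 0) raises), single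
underscores between digits (and one right after a prefix), digits 0-9 a-z A-Z below the base. none = ValueError (also for a bad base).
(int(s) with no base is ofChars? = ofCharsBase? s 10; Unicode digits are outside the stated domain.) -/
def ofCharsBase? (s : _root_.List Char) (base : _root_.Int) : Option _root_.Int :=
  if ¬ (base = 0 ∨ (2 ≤ base ∧ base ≤ 36)) then none else
  let cs := (s.dropWhile isIntSpace).reverse.dropWhile isIntSpace |>.reverse
  let (neg, cs) : Bool × _root_.List Char := match cs with
    | '-' :: r => (true, r)
    | '+' :: r => (false, r)
    | r => (false, r)
  let pfx : Option Nat := match cs with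
    | '0' :: c :: _ => if c = 'b' ∨ c = 'B' then some 2 else if c = 'o' ∨ c = 'O' then some 8 else if c = 'x' ∨ c = 'X' then some 16 else none
    | _ => none
  let usePfx : Bool := match pfx with | some p => base = 0 ∨ base.toNat = p | none => false
  let b : Nat := if usePfx then pfx.getD 10 else if base = 0 then 10 else base.toNat
  -- '0b_1' is fine (one underscore right after a prefix) but '0b_' / '0b__1' are not
  let ds := if usePfx then (match cs.drop 2 with | '_' :: d :: r => if digitOk b d then d :: r else '_' :: d :: r | r => r) else cs
  match digitsValB? b ds with
  | none => none
  | some n =>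
    if base = 0 ∧ ¬ usePfx ∧ n ≠ 0 ∧ ds.head? = some '0' then none
    else some (if neg then -(n : _root_.Int) else (n : _root_.Int))
/-- Python 'int(s, base)'. -/
def ofStrBase? (s : String) (base : _root_.Int) : Option _root_.Int := ofCharsBase? s.toList base
@[simp] theorem ofStrBase?_ofList (cs : _root_.List Char) (b : _root_.Int) : ofStrBase? (String.ofList cs) b = ofCharsBase? cs b := by simp [ofStrBase?]


/-- Python `str(n)` as characters: a leading '-' for negatives, then the decimal digits (Nat.toDigits — kernel-transparent). -/
def toChars (n : _root_.Int) : _root_.List Char :=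
  if n < 0 then '-' :: Nat.toDigits 10 n.natAbs else Nat.toDigits 10 n.toNat

/-- Python `str(n)` for an int. -/
def toStr (n : _root_.Int) : String := String.ofList (toChars n)

@[simp] theorem toList_toStr (n : _root_.Int) : (toStr n).toList = toChars n := by simp [toStr]

/-- Python `format(n, 'b')` / `f"{n:b}"` as characters: the binary digits of |n| (Nat.toDigits 2 — kernel-transparent; "0" for 0),
with a leading '-' for negatives. NOT `bin(n)` (that one carries the "0b" prefix: `toBinChars0b`). -/
def toBinChars (n : _root_.Int) : _root_.List Char :=
  if n < 0 then '-' :: Nat.toDigits 2 n.natAbs else Nat.toDigits 2 n.toNat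

/-- Python `format(n, 'b')`. -/
def toBin (n : _root_.Int) : String := String.ofList (toBinChars n)

/-- Python `bin(n)` as characters: "0b" + binary digits, "-0b…" for negatives. -/
def toBinChars0b (n : _root_.Int) : _root_.List Char :=
  if n < 0 then '-' :: '0' :: 'b' :: Nat.toDigits 2 n.natAbs else '0' :: 'b' :: Nat.toDigits 2 n.toNat

/-- Python `bin(n)`. -/
def pyBin (n : _root_.Int) : String := String.ofList (toBinChars0b n)

@[simp] theorem toList_toBin (n : _root_.Int) : (toBin n).toList = toBinChars n := by simp [toBin]
@[simp] theorem toList_pyBin (n : _root_.Int) : (pyBin n).toList = toBinChars0b n := by simp [pyBin]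
@[simp] theorem ofStr?_ofList (cs : _root_.List Char) : ofStr? (String.ofList cs) = ofChars? cs := by simp [ofStr?]

end Int

end PySem
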